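-- pv_equiv track=rewrite | github.com/avp55/advent-of-code-2024 | day4/puzzle.py | dfs
-- ===== SOURCE A (Python) =====
-- def dfs(x, y, n, grid, search, directions):
--     if grid[x][y] != search[n]:
--         return 0
--     if n+1 >= len(search):
--         return 1
--     total = 0
--     dx, dy = directions
--     nx, ny = dx+x, dy+y
--     if nx < 0 or ny < 0 or nx >= len(grid) or ny >= len(grid[0]):
--         return 0
--     total += dfs(nx, ny, n+1, grid, search, directions)
--     return total
-- ===== SOURCE B (Python) =====
-- def dfs(x, y, n, grid, search, directions):
--     dx, dy = directions
--     H, W = len(grid), len(grid[0])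
--
--     def steps(c, d, M):
--         # max s such that steps 1..s keep 0 <= c + k*d < M; None = unbounded
--         if d == 0:
--             return None if 0 <= c < M else 0
--         if d > 0:
--             return 0 if c + d < 0 else max(0, (M - 1 - c) // d)
--         return 0 if c + d >= M else max(0, c // (-d))
--
--     need = len(search) - n
--     t = need - 1
--     for s in (steps(x, dx, H), steps(y, dy, W)):
--         if s is not None and s < t:
--             t = s
--     t = max(t, 0)  # the starting cell is always compared
--     for k in range(t + 1):
--         if grid[x + k * dx][y + k * dy] != search[n + k]:
--             return 0
--     return 1 if t + 1 == need else 0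
-- ===== Notes on version B (the rewrite author's own statement) =====
-- stated objective: alternative
-- what changed: B replaces A's step-by-step recursion (which re-checks the box bounds before every recursive call) by a closed-form arithmetic computation of how many steps stay inside the grid box per axis, followed by a single flat comparison loop over those positions with the same early-exit order as A.
-- outside the precondition, e.g. on dfs(0, 0, 0, [['q', 'b'], ['a']], 'xy', (1, 1)): A returns 0, B returns 0
import Mathlib
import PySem

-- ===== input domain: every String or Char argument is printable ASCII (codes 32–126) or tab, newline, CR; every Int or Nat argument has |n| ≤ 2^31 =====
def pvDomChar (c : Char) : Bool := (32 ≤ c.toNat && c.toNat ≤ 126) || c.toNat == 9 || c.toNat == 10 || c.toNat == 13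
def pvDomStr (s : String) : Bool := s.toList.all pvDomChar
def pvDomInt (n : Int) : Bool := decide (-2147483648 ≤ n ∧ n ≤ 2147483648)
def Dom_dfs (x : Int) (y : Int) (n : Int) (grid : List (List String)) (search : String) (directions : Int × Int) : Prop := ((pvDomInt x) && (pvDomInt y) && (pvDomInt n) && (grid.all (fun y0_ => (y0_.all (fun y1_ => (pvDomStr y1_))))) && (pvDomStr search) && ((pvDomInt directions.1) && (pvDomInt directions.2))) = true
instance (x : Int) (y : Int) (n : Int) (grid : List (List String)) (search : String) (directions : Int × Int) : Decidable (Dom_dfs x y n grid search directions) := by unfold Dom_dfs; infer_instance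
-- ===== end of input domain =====

-- B replaces A's step-by-step recursive bounds checks by a closed-form arithmetic bound on how
-- many steps stay inside the grid box, then a single flat comparison loop over those positions;
-- alternative decomposition, similar cost.

-- grid[a][b] as an optional value (none = IndexError), shared by both ports
def dfsCell (grid : List (List String)) (a b : Int) : Option String :=
  (PySem.List.pyGet? grid a).bind (fun row => PySem.List.pyGet? row b)

-- search[j] as an optional 1-character string (none = IndexError), shared by both ports
def dfsChar (search : String) (j : Int) : Option String :=
  (PySem.Str.pyGet? search j).map (fun c => String.ofList [c])

-- ===== PORT A =====
-- A's recursion, with a fuel argument for termination; fuel 2*len(search)+1 exceeds the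
-- recursion depth on every input Pre_dfs admits (n increases each call and stays < len(search)).
def dfsGo (fuel : Nat) (x y n : Int) (grid : List (List String)) (search : String) (directions : Int × Int) : Int :=
  match fuel with
  | 0 => 0
  | fuel + 1 =>
    if dfsCell grid x y ≠ dfsChar search n then 0
    else if n + 1 ≥ PySem.Str.len search then 1
    else
      let total : Int := 0
      let dx := directions.1
      let dy := directions.2
      let nx := dx + x
      let ny := dy + y
      if nx < 0 ∨ ny < 0 ∨ nx ≥ (grid.length : Int) ∨ ny ≥ (((PySem.List.pyGet? grid 0).getD []).length : Int) then 0
      else total + dfsGo fuel nx ny (n + 1) grid search directions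

def dfs (x : Int) (y : Int) (n : Int) (grid : List (List String)) (search : String) (directions : Int × Int) : Int :=
  dfsGo (2 * PySem.Str.len search + 1).toNat x y n grid search directions

-- ===== PORT B =====
-- Source B's steps(c, d, M): max s with steps 1..s keeping 0 <= c + k*d < M; none = unbounded
def dfsSteps (c d M : Int) : Option Int :=
  if d = 0 then (if 0 ≤ c ∧ c < M then none else some 0)
  else if 0 < d then (if c + d < 0 then some 0 else some (max 0 (PySem.Int.floordiv (M - 1 - c) d)))
  else (if c + d ≥ M then some 0 else some (max 0 (PySem.Int.floordiv c (-d))))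

-- Source B's 'for s in (sx, sy): if s is not None and s < t: t = s', one candidate at a time
def dfsMinS (s : Option Int) (t : Int) : Int :=
  match s with
  | none => t
  | some v => if v < t then v else t

-- Source B's 'for k in range(t+1)' comparison loop with its early return and trailing return
def dfsLoop (x y n dx dy : Int) (grid : List (List String)) (search : String) (t need : Int) : List Int → Int
  | [] => if t + 1 = need then 1 else 0
  | k :: ks =>
    if dfsCell grid (x + k * dx) (y + k * dy) ≠ dfsChar search (n + k) then 0
    else dfsLoop x y n dx dy grid search t need ks

def dfs_alt (x : Int) (y : Int) (n : Int) (grid : List (List String)) (search : String) (directions : Int × Int) : Int :=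
  let dx := directions.1
  let dy := directions.2
  let H : Int := grid.length
  let W : Int := (((PySem.List.pyGet? grid 0).getD []).length : Int)
  let need := PySem.Str.len search - n
  let t := max (dfsMinS (dfsSteps y dy W) (dfsMinS (dfsSteps x dx H) (need - 1))) 0
  dfsLoop x y n dx dy grid search t need (PySem.List.pyRange 0 (t + 1) 1)

-- ===== PRECONDITION & SPEC =====
-- Pre_dfs excludes exactly the IndexError inputs: invalid initial indices x, y, n, and ragged
-- grids whose rows at box-interior ray positions are shorter than row 0 (A's bounds check uses
-- len(grid[0]), so visiting such a position raises); the last condition conservatively also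
-- excludes some inputs where an early character mismatch makes A return 0 before reaching the
-- short row — there B returns 0 too (see the cites in the claim).
def Pre_dfs (x : Int) (y : Int) (n : Int) (grid : List (List String)) (search : String) (directions : Int × Int) : Prop :=
  PySem.Raise.InRange grid.length x ∧
  PySem.Raise.InRange ((PySem.List.pyGet? grid x).getD []).length y ∧
  PySem.Raise.InRange search.toList.length n ∧
  ∀ k ∈ List.range (2 * search.toList.length + 1), 1 ≤ k →
    n + (k : Int) < (search.toList.length : Int) →
    (0 ≤ x + k * directions.1 ∧ x + k * directions.1 < (grid.length : Int) ∧
     0 ≤ y + k * directions.2 ∧ y + k * directions.2 < (((PySem.List.pyGet? grid 0).getD []).length : Int)) →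
    y + k * directions.2 < (((PySem.List.pyGet? grid (x + k * directions.1)).getD []).length : Int)
instance (x : Int) (y : Int) (n : Int) (grid : List (List String)) (search : String) (directions : Int × Int) : Decidable (Pre_dfs x y n grid search directions) := by unfold Pre_dfs; infer_instance

def pvWitness_dfs : Int × Int × Int × List (List String) × String × (Int × Int) :=
  (0, 0, 0, [["X", "M"], ["A", "S"]], "XA", (1, 0))

def Spec_dfs (x : Int) (y : Int) (n : Int) (grid : List (List String)) (search : String) (directions : Int × Int) (out : Int) : Prop := out = dfs_alt x y n grid search directions
instance (x : Int) (y : Int) (n : Int) (grid : List (List String)) (search : String) (directions : Int × Int) (out : Int) : Decidable (Spec_dfs x y n grid search directions out) := by unfold Spec_dfs; infer_instance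

-- ===== CLAIM =====
def Claim_equal_dfs : Prop := ∀ (x : Int) (y : Int) (n : Int) (grid : List (List String)) (search : String) (directions : Int × Int), Dom_dfs x y n grid search directions → Pre_dfs x y n grid search directions → Spec_dfs x y n grid search directions (dfs x y n grid search directions)

-- ===== LEMMAS AND PROOFS =====

theorem pvWitness_pre : Dom_dfs pvWitness_dfs.1 pvWitness_dfs.2.1 pvWitness_dfs.2.2.1 pvWitness_dfs.2.2.2.1 pvWitness_dfs.2.2.2.2.1 pvWitness_dfs.2.2.2.2.2 ∧ Pre_dfs pvWitness_dfs.1 pvWitness_dfs.2.1 pvWitness_dfs.2.2.1 pvWitness_dfs.2.2.2.1 pvWitness_dfs.2.2.2.2.1 pvWitness_dfs.2.2.2.2.2 := by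
  decide

-- 'k is allowed by the axis bound s' (none = unbounded)
def dfsAllow (s : Option Int) (k : Int) : Prop := ∀ v, s = some v → k ≤ v

theorem dfsSteps_nonneg (c d M : Int) : dfsAllow (dfsSteps c d M) 0 := by
  intro v hv
  unfold dfsSteps at hv
  split_ifs at hv <;> simp_all <;> omega

theorem dfsMinS_le_right (s : Option Int) (t : Int) : dfsMinS s t ≤ t := by
  cases s with
  | none => exact le_rfl
  | some v => simp only [dfsMinS]; split_ifs <;> omega

theorem dfsMinS_le_iff (s : Option Int) (t k : Int) :
    k ≤ dfsMinS s t ↔ dfsAllow s k ∧ k ≤ t := by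
  cases s with
  | none => simp [dfsMinS, dfsAllow]
  | some v =>
    simp only [dfsMinS, dfsAllow]
    constructor
    · intro h
      split_ifs at h <;> constructor <;> try omega
      · intro w hw; injection hw with hw; omega
      · intro w hw; injection hw with hw; omega
    · rintro ⟨h1, h2⟩
      have := h1 v rfl
      split_ifs <;> omega

-- if k ≥ 1 is allowed by the axis bound, the k-th position is in range on that axis
theorem dfsSteps_allow_inbox (c d M k : Int) (hk : 1 ≤ k)
    (h : dfsAllow (dfsSteps c d M) k) : 0 ≤ c + k * d ∧ c + k * d < M := by
  unfold dfsAllow dfsSteps at h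
  by_cases h0 : d = 0
  · subst h0
    by_cases hin : 0 ≤ c ∧ c < M
    · simpa using hin
    · rw [if_pos rfl, if_neg hin] at h; have := h 0 rfl; omega
  · by_cases hd : 0 < d
    · by_cases hneg : c + d < 0
      · rw [if_neg h0, if_pos hd, if_pos hneg] at h; have := h 0 rfl; omega
      · rw [if_neg h0, if_pos hd, if_neg hneg] at h
        have hle := h _ rfl
        have hfl : k ≤ PySem.Int.floordiv (M - 1 - c) d := by
          rcases le_max_iff.mp hle with h' | h' <;> omega
        have hmul := (PySem.Int.le_floordiv_iff_mul_le hd).mp hfl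
        constructor <;> nlinarith
    · have hdneg : d < 0 := by omega
      by_cases hge : c + d ≥ M
      · rw [if_neg h0, if_neg hd, if_pos hge] at h; have := h 0 rfl; omega
      · rw [if_neg h0, if_neg hd, if_neg hge] at h
        have hle := h _ rfl
        have hfl : k ≤ PySem.Int.floordiv c (-d) := by
          rcases le_max_iff.mp hle with h' | h' <;> omega
        have hmul := (PySem.Int.le_floordiv_iff_mul_le (by omega : (0:Int) < -d)).mp hfl
        constructor <;> nlinarith

-- converse: an in-box (k+1)-st position is allowed, given k = 0 or k itself allowed
theorem dfsSteps_inbox_allow (c d M k : Int) (hk : 0 ≤ k)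
    (hpre : k = 0 ∨ dfsAllow (dfsSteps c d M) k)
    (hin : 0 ≤ c + (k + 1) * d ∧ c + (k + 1) * d < M) :
    dfsAllow (dfsSteps c d M) (k + 1) := by
  intro v hv
  unfold dfsSteps at hv
  by_cases h0 : d = 0
  · subst h0
    by_cases hinb : 0 ≤ c ∧ c < M
    · rw [if_pos rfl, if_pos hinb] at hv; exact absurd hv (by simp)
    · exact absurd (by simpa using hin) hinb
  · by_cases hd : 0 < d
    · by_cases hneg : c + d < 0
      · exfalso
        have hk0 : k = 0 := by
          rcases hpre with hk0 | hal
          · exact hk0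
          · have := hal 0 (by unfold dfsSteps; rw [if_neg h0, if_pos hd, if_pos hneg]); omega
        subst hk0
        have h2 : c + (0 + 1) * d = c + d := by ring
        have := hin.1; rw [h2] at this; omega
      · rw [if_neg h0, if_pos hd, if_neg hneg] at hv
        injection hv with hv; subst hv
        have hmul : (k + 1) * d ≤ M - 1 - c := by linarith [hin.2]
        exact le_max_of_le_right ((PySem.Int.le_floordiv_iff_mul_le hd).mpr hmul)
    · have hdneg : d < 0 := by omega
      by_cases hge : c + d ≥ M
      · exfalso
        have hk0 : k = 0 := by
          rcases hpre with hk0 | hal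
          · exact hk0
          · have := hal 0 (by unfold dfsSteps; rw [if_neg h0, if_neg hd, if_pos hge]); omega
        subst hk0
        have h2 : c + (0 + 1) * d = c + d := by ring
        have := hin.2; rw [h2] at this; omega
      · rw [if_neg h0, if_neg hd, if_neg hge] at hv
        injection hv with hv; subst hv
        have hmul : (k + 1) * (-d) ≤ c := by nlinarith [hin.1]
        exact le_max_of_le_right ((PySem.Int.le_floordiv_iff_mul_le (by omega : (0:Int) < -d)).mpr hmul)

-- the heart of the proof: A's recursion from the k-th ray position computes B's loop from index k
theorem dfsGo_eq_loop (grid : List (List String)) (search : String) (dx dy x y n tx ty need t : _)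
    (htx : tx = dfsSteps x dx (grid.length : Int))
    (hty : ty = dfsSteps y dy (((PySem.List.pyGet? grid 0).getD []).length : Int))
    (hneed : need = PySem.Str.len search - n)
    (ht : t = dfsMinS ty (dfsMinS tx (need - 1))) :
    ∀ (fuel : Nat) (k : Int), 0 ≤ k → k ≤ t → (need - k).toNat ≤ fuel →
      dfsGo fuel (x + k * dx) (y + k * dy) (n + k) grid search (dx, dy) =
        dfsLoop x y n dx dy grid search t need (PySem.List.pyRange k (t + 1) 1) := by
  subst ht hneed hty htx
  set tx := dfsSteps x dx (grid.length : Int) with htx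
  set ty := dfsSteps y dy (((PySem.List.pyGet? grid 0).getD []).length : Int) with hty
  set need := PySem.Str.len search - n with hneed
  set t := dfsMinS ty (dfsMinS tx (need - 1)) with ht
  intro fuel
  induction fuel with
  | zero =>
    intro k hk0 hkt hf
    -- fuel 0 forces need ≤ k; but k ≤ t ≤ need - 1
    exfalso
    have h1 : k ≤ dfsMinS tx (need - 1) := ((dfsMinS_le_iff ty _ k).mp (ht ▸ hkt)).2
    have h2 : k ≤ need - 1 := ((dfsMinS_le_iff tx _ k).mp h1).2
    omega
  | succ fuel ih =>
    intro k hk0 hkt hf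
    have h1 : k ≤ dfsMinS tx (need - 1) := ((dfsMinS_le_iff ty _ k).mp (ht ▸ hkt)).2
    have hay : dfsAllow ty k := ((dfsMinS_le_iff ty _ k).mp (ht ▸ hkt)).1
    have hax : dfsAllow tx k := ((dfsMinS_le_iff tx _ k).mp h1).1
    have hkneed : k ≤ need - 1 := ((dfsMinS_le_iff tx _ k).mp h1).2
    have haxk : dfsAllow tx k := hax
    have htle : t ≤ need - 1 := by
      rw [ht]
      exact le_trans (dfsMinS_le_right _ _) (dfsMinS_le_right _ _)
    have hcons : PySem.List.pyRange k (t + 1) 1 = k :: PySem.List.pyRange (k + 1) (t + 1) 1 :=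
      PySem.List.pyRange_one_cons (by omega)
    rw [hcons]
    simp only [dfsGo, dfsLoop]
    by_cases hc : dfsCell grid (x + k * dx) (y + k * dy) = dfsChar search (n + k)
    · rw [if_neg (not_not.mpr hc), if_neg (not_not.mpr hc)]
      by_cases hlast : n + k + 1 ≥ PySem.Str.len search
      · -- k + 1 ≥ need: A returns 1; B's remaining range is empty and t + 1 = need
        have hkt' : k = t := by omega
        have hnil : PySem.List.pyRange (k + 1) (t + 1) 1 = [] :=
          PySem.List.pyRange_one_eq_nil (by omega)
        rw [if_pos hlast, hnil]
        simp only [dfsLoop]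
        rw [if_pos (by omega : t + 1 = need)]
      · rw [if_neg hlast]
        have hneed1 : k + 1 ≤ need - 1 := by
          rw [hneed] at *; omega
        by_cases hbox : dx + (x + k * dx) < 0 ∨ dy + (y + k * dy) < 0 ∨
            (grid.length : Int) ≤ dx + (x + k * dx) ∨
            (((PySem.List.pyGet? grid 0).getD []).length : Int) ≤ dy + (y + k * dy)
        · -- next position out of the box: A returns 0; show k = t, B's tail is empty, t+1 < need
          rw [if_pos (by omega : dx + (x + k * dx) < 0 ∨ dy + (y + k * dy) < 0 ∨
            (grid.length : Int) ≤ dx + (x + k * dx) ∨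
            (((PySem.List.pyGet? grid 0).getD []).length : Int) ≤ dy + (y + k * dy))]
          have hkeqt : k = t := by
            by_contra hne
            have hk1t : k + 1 ≤ t := by omega
            have hx1 : dfsAllow tx (k + 1) := ((dfsMinS_le_iff tx _ (k+1)).mp ((dfsMinS_le_iff ty _ (k+1)).mp (ht ▸ hk1t)).2).1
            have hy1 : dfsAllow ty (k + 1) := ((dfsMinS_le_iff ty _ (k+1)).mp (ht ▸ hk1t)).1
            have hix := dfsSteps_allow_inbox x dx (grid.length : Int) (k + 1) (by omega) hx1
            have hiy := dfsSteps_allow_inbox y dy (((PySem.List.pyGet? grid 0).getD []).length : Int) (k + 1) (by omega) hy1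
            have e1 : x + (k + 1) * dx = dx + (x + k * dx) := by ring
            have e2 : y + (k + 1) * dy = dy + (y + k * dy) := by ring
            rw [e1] at hix; rw [e2] at hiy
            omega
          rw [hkeqt, PySem.List.pyRange_one_eq_nil (by omega)]
          simp only [dfsLoop]
          rw [if_neg (by omega : ¬ t + 1 = need)]
        · -- next position in the box: both sides step
          simp only [not_or, not_lt, not_le] at hbox
          obtain ⟨b1, b2, b3, b4⟩ := hbox
          have e1 : dx + (x + k * dx) = x + (k + 1) * dx := by ring
          have e2 : dy + (y + k * dy) = y + (k + 1) * dy := by ring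
          have hx1 : dfsAllow tx (k + 1) := by
            apply dfsSteps_inbox_allow x dx _ k hk0 (Or.inr haxk)
            rw [← e1]; omega
          have hy1 : dfsAllow ty (k + 1) := by
            apply dfsSteps_inbox_allow y dy _ k hk0 (Or.inr hay)
            rw [← e2]; omega
          have hk1t : k + 1 ≤ t := by
            rw [ht, dfsMinS_le_iff]
            exact ⟨hy1, by rw [dfsMinS_le_iff]; exact ⟨hx1, hneed1⟩⟩
          rw [if_neg (by omega : ¬ (dx + (x + k * dx) < 0 ∨ dy + (y + k * dy) < 0 ∨
            (grid.length : Int) ≤ dx + (x + k * dx) ∨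
            (((PySem.List.pyGet? grid 0).getD []).length : Int) ≤ dy + (y + k * dy)))]
          have hstep : n + k + 1 = n + (k + 1) := by ring
          rw [e1, e2, hstep, ih (k + 1) (by omega) hk1t (by omega)]
          omega
    · rw [if_pos hc, if_pos hc]

-- ===== VERDICT =====
theorem dfs_spec : Claim_equal_dfs := by
  intro x y n grid search directions _ hpre
  obtain ⟨_, _, hn, _⟩ := hpre
  have hn' : n < (search.length : Int) ∧ -(search.length : Int) ≤ n := by
    simp [PySem.Raise.InRange, String.length_toList] at hn
    omega
  unfold Spec_dfs dfs dfs_alt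
  obtain ⟨dx, dy⟩ := directions
  simp only
  have hlen : PySem.Str.len search = (search.length : Int) := by
    rw [PySem.Str.len_eq, String.length_toList]
  have h0t : (0 : Int) ≤ dfsMinS (dfsSteps y dy (((PySem.List.pyGet? grid 0).getD []).length : Int))
      (dfsMinS (dfsSteps x dx (grid.length : Int)) (PySem.Str.len search - n - 1)) := by
    rw [dfsMinS_le_iff]
    refine ⟨dfsSteps_nonneg _ _ _, ?_⟩
    rw [dfsMinS_le_iff]
    exact ⟨dfsSteps_nonneg _ _ _, by omega⟩
  have hmax : max (dfsMinS (dfsSteps y dy (((PySem.List.pyGet? grid 0).getD []).length : Int))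
      (dfsMinS (dfsSteps x dx (grid.length : Int)) (PySem.Str.len search - n - 1))) 0 =
      dfsMinS (dfsSteps y dy (((PySem.List.pyGet? grid 0).getD []).length : Int))
      (dfsMinS (dfsSteps x dx (grid.length : Int)) (PySem.Str.len search - n - 1)) :=
    max_eq_left h0t
  rw [hmax]
  have := dfsGo_eq_loop grid search dx dy x y n _ _ _ _ rfl rfl rfl rfl
    (2 * PySem.Str.len search + 1).toNat 0 le_rfl h0t (by omega)
  simp only [zero_mul, add_zero] at this
  convert this using 3
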